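-- pv_equiv track=rewrite | github.com/tade3910/Advent_Of_Code_2024 | day15/script2.py | moveBoxesRight
-- ===== SOURCE A (Python) =====
-- LEFTBOX = '['
--
-- RIGHTBOX = ']'
--
-- WALL = '#'
--
-- FREESPACE = '.'
--
-- def moveBoxesRight(world:list[list[str]],curLocation:tuple[int,int]):
--     curRow,curCol = curLocation
--     nextRow,nextCol = curRow, curCol + 2
--     if world[nextRow][nextCol] == WALL:
--         return False
--     elif world[nextRow][nextCol] == FREESPACE or moveBoxesRight(world,(nextRow,nextCol)):
--         world[curRow][curCol] = FREESPACE
--         world[curRow][curCol + 1] = LEFTBOX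
--         world[nextRow][nextCol] = RIGHTBOX
--         return True
--     return False
-- ===== SOURCE B (Python) =====
-- LEFTBOX = '['
--
-- RIGHTBOX = ']'
--
-- WALL = '#'
--
-- FREESPACE = '.'
--
-- def moveBoxesRight(world, curLocation):
--     curRow, curCol = curLocation
--     row = world[curRow]
--     # forward scan: collect left-bracket columns of the box chain
--     cols = [curCol]
--     c = curCol + 2
--     while True:
--         cell = row[c]
--         if cell == WALL:
--             return False
--         if cell == FREESPACE:
--             break
--         cols.append(c)
--         c += 2
--     # write pass, rightmost box first (matches A's deepest-first writes)
--     for b in reversed(cols):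
--         row[b] = FREESPACE
--         row[b + 1] = LEFTBOX
--         row[b + 2] = RIGHTBOX
--     return True
-- ===== Notes on version B (the rewrite author's own statement) =====
-- stated objective: alternative
-- what changed: A's recursive push (check cell two to the right, recurse through the box chain, write on unwind) is replaced by an iterative forward scan that collects the box left-bracket columns and, on success, a single right-to-left write pass.
import Mathlib
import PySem

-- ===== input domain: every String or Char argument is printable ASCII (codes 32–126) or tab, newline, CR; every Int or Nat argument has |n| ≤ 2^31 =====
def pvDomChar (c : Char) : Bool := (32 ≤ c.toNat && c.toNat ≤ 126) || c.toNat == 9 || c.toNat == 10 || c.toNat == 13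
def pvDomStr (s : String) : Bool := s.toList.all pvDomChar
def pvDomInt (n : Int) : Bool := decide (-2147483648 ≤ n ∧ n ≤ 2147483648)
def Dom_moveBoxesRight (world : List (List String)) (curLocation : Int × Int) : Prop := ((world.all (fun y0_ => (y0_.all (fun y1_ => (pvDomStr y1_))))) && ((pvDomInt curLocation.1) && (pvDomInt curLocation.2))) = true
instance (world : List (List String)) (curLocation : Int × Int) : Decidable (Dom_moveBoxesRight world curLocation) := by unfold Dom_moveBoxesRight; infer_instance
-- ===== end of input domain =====

-- B replaces A's recursive push by an iterative forward scan that collects the box columns,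
-- followed by a right-to-left write pass (objective: alternative decomposition, same cost).
-- Both Pythons mutate `world` in place (B performs the identical writes in the identical
-- order); the equivalence proved here is about the RETURN value only.

def WALL : String := "#"
def FREESPACE : String := "."

-- ===== PORT A =====
-- A's recursion, with curLocation split into curRow/curCol and a fuel guard making the same
-- computation total: the scanned column grows by 2 each call, so after at most row-length
-- valid accesses pyGet? returns none and the recursion stops; fuel (row length + 3) is
-- never exhausted and the fuel-0 branch is unreachable.
def moveBoxesRightGo (world : List (List String)) (curRow curCol : Int) : Nat → Bool
  | 0 => false  -- unreachable (see comment above)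
  | fuel + 1 =>
    match PySem.List.pyGet? world curRow with
    | none => false  -- Python: IndexError (excluded by Pre_)
    | some row =>
      match PySem.List.pyGet? row (curCol + 2) with
      | none => false  -- Python: IndexError (excluded by Pre_)
      | some cell =>
        if cell = WALL then false
        else if cell = FREESPACE then true
        else moveBoxesRightGo world curRow (curCol + 2) fuel

def moveBoxesRight (world : List (List String)) (curLocation : Int × Int) : Bool :=
  moveBoxesRightGo world curLocation.1 curLocation.2
    (((PySem.List.pyGet? world curLocation.1).getD []).length + 3)

-- ===== PORT B =====
-- Source B's while-loop: scan forward by 2 collecting box columns; none = WALL hit or IndexError.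
-- Same fuel guard as above (the scan leaves the row after at most row-length steps).
def bScanGo (row : List String) (c : Int) (cols : List Int) : Nat → Option (List Int)
  | 0 => none  -- unreachable (see comment above)
  | fuel + 1 =>
    match PySem.List.pyGet? row c with
    | none => none  -- Python: IndexError (excluded by Pre_)
    | some cell =>
      if cell = WALL then none
      else if cell = FREESPACE then some cols
      else bScanGo row (c + 2) (cols ++ [c]) fuel

-- Source B's write pass over reversed(cols) only mutates the row (no Lean counterpart);
-- the returned Bool is `false` iff the scan failed, `true` otherwise.
def moveBoxesRight_alt (world : List (List String)) (curLocation : Int × Int) : Bool :=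
  match PySem.List.pyGet? world curLocation.1 with
  | none => false  -- Python: IndexError (excluded by Pre_)
  | some row =>
    match bScanGo row (curLocation.2 + 2) [curLocation.2] (row.length + 3) with
    | none => false
    | some _cols => true

-- ===== PRECONDITION & SPEC =====
-- Pre_ excludes exactly the inputs on which Python A raises IndexError: the row index must
-- be valid, and the cells at columns curCol+2, curCol+4, … must stay in range until one of
-- them is WALL or FREESPACE.
def Pre_moveBoxesRight (world : List (List String)) (curLocation : Int × Int) : Prop :=
  (PySem.List.pyGet? world curLocation.1).isSome = true ∧
  (let row := (PySem.List.pyGet? world curLocation.1).getD []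
   ∃ k ∈ Finset.range (row.length + 2),
     (∀ i ∈ Finset.range (k + 1), (PySem.List.pyGet? row (curLocation.2 + 2 * ((i : Int) + 1))).isSome = true) ∧
     ((PySem.List.pyGet? row (curLocation.2 + 2 * ((k : Int) + 1))).getD "" = WALL ∨
      (PySem.List.pyGet? row (curLocation.2 + 2 * ((k : Int) + 1))).getD "" = FREESPACE))
instance (world : List (List String)) (curLocation : Int × Int) : Decidable (Pre_moveBoxesRight world curLocation) := by unfold Pre_moveBoxesRight; infer_instance

def pvWitness_moveBoxesRight : List (List String) × (Int × Int) := ([["[", "]", "[", "]", "."]], (0, 0))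

def Spec_moveBoxesRight (world : List (List String)) (curLocation : Int × Int) (out : Bool) : Prop := out = moveBoxesRight_alt world curLocation
instance (world : List (List String)) (curLocation : Int × Int) (out : Bool) : Decidable (Spec_moveBoxesRight world curLocation out) := by unfold Spec_moveBoxesRight; infer_instance

-- ===== CLAIM (what is proved, stated in full; the proofs are below) =====
def Claim_equal_moveBoxesRight : Prop := ∀ (world : List (List String)) (curLocation : Int × Int), Dom_moveBoxesRight world curLocation → Pre_moveBoxesRight world curLocation → Spec_moveBoxesRight world curLocation (moveBoxesRight world curLocation)

-- ===== LEMMAS AND PROOFS =====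

-- For every fuel value, A's recursion returns exactly "B's scan succeeded"
-- (the accumulated column list does not influence success).
theorem go_eq_scan (fuel : Nat) (world : List (List String)) (r : Int) :
    ∀ (c : Int) (cols : List Int),
      moveBoxesRightGo world r c fuel =
        (match PySem.List.pyGet? world r with
         | none => false
         | some row => (bScanGo row (c + 2) cols fuel).isSome) := by
  induction fuel with
  | zero =>
    intro c cols
    cases h : PySem.List.pyGet? world r <;> simp [moveBoxesRightGo, bScanGo]
  | succ fuel ih =>
    intro c cols
    cases h : PySem.List.pyGet? world r with
    | none => simp [moveBoxesRightGo, h]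
    | some row =>
      simp only [moveBoxesRightGo, bScanGo, h]
      cases hc : PySem.List.pyGet? row (c + 2) with
      | none => simp
      | some cell =>
        simp only
        by_cases hw : cell = WALL
        · simp [hw]
        · by_cases hf : cell = FREESPACE
          · subst hf; simp [WALL, FREESPACE]
          · simp only [if_neg hw, if_neg hf]
            rw [ih (c + 2) (cols ++ [c + 2])]
            simp [h]

-- ===== VERDICT (by name: the statement is the Claim_ definition above) =====
theorem moveBoxesRight_spec : Claim_equal_moveBoxesRight := by
  intro world loc _ _
  unfold Spec_moveBoxesRight moveBoxesRight moveBoxesRight_alt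
  rw [go_eq_scan _ world loc.1 loc.2 [loc.2]]
  cases h : PySem.List.pyGet? world loc.1 with
  | none => rfl
  | some row =>
    simp only [Option.getD_some]
    cases bScanGo row (loc.2 + 2) [loc.2] (row.length + 3) <;> rfl
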